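-- pv_equiv track=rewrite | github.com/stevenxxiu/asmdeobf | analysis/constraint.py | _expand_constraints
-- ===== SOURCE A (Python) =====
-- def _expand_constraints(tuple_cons):
--     # go through each flag
--     if not tuple_cons:
--         return []
--     for i in range(len(tuple_cons[0])):
--         res = []
--         for con in tuple_cons:
--             if con[i] is None:
--                 res.append(con[:i] + (0,) + con[i + 1:])
--                 res.append(con[:i] + (1,) + con[i + 1:])
--             else:
--                 res.append(con)
--         tuple_cons = res
--     return tuple_cons
-- ===== SOURCE B (Python) =====
-- def _expand_constraints(tuple_cons):
--     if not tuple_cons: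
--         return []
--     n_flags = len(tuple_cons[0])
--     res = []
--     for con in tuple_cons:
--         done = [()]
--         for x in con[:n_flags]:
--             if x is None:
--                 done = [d + (v,) for d in done for v in (0, 1)]
--             else:
--                 done = [d + (x,) for d in done]
--         res.extend(d + con[n_flags:] for d in done)
--     return res
-- ===== Notes on version B (the rewrite author's own statement) =====
-- stated objective: alternative
-- what changed: Instead of one full rebuild of the whole constraint list per flag position, B makes a single pass that expands each constraint's flag part independently into its 0/1 completions with an accumulator product over its None slots.
-- outside the precondition, e.g. on _expand_constraints([(0,), (1, None)]): A returns [(0,), (1, None)], B returns [(0,), (1, None)]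
import Mathlib
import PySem

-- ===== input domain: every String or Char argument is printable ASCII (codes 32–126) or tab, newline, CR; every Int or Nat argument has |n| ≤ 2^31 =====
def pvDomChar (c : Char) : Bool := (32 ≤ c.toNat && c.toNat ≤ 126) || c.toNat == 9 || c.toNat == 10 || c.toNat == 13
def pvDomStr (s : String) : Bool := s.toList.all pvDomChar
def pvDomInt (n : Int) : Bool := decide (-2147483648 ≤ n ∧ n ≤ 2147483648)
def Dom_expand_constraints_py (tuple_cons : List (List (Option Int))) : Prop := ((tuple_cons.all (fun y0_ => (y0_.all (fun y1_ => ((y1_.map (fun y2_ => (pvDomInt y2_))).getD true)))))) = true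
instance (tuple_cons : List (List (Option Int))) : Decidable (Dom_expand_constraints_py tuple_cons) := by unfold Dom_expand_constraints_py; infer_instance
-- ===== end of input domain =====

-- B replaces A's per-flag-position rebuild of the whole constraint list by a single pass
-- that expands each constraint's flag part (width = first constraint's length) into its 0/1
-- completions on its own (return value only; A mutates nothing).

-- ===== PORT A =====
-- res-building inner loop over one flag index i (res.append of the 0/1 splits or of con unchanged)
def pvA_step (i : Nat) (tc : List (List (Option Int))) : List (List (Option Int)) :=
  tc.foldl (fun res con =>
    res ++
      match PySem.List.pyGet? con (Int.ofNat i) with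
      | some none =>
          [con.take i ++ [some 0] ++ con.drop (i + 1),
           con.take i ++ [some 1] ++ con.drop (i + 1)]
      | _ => [con]) []

-- the 'for i in range(len(tuple_cons[0]))' loop, reassigning tuple_cons each round
def pvA_loop (is_ : List Nat) (tc : List (List (Option Int))) : List (List (Option Int)) :=
  match is_ with
  | [] => tc
  | i :: rest => pvA_loop rest (pvA_step i tc)

def expand_constraints_py (tuple_cons : List (List (Option Int))) : List (List Int) :=
  match tuple_cons with
  | [] => []
  | c0 :: _ =>
      -- final cast to the declared type List (List Int): exact when no None remains (Pre_)
      (pvA_loop (List.range c0.length) tuple_cons).map (fun con => con.map (fun x => x.getD 0))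

-- ===== PORT B =====
-- one row's flag-part completions: accumulator 'done' of finished prefixes, extended element by element
def pvB_row (flags : List (Option Int)) : List (List Int) :=
  flags.foldl (fun done x =>
    match x with
    | none => done.flatMap (fun d => [d ++ [0], d ++ [1]])
    | some v => done.map (fun d => d ++ [v])) [[]]

def expand_constraints_py_alt (tuple_cons : List (List (Option Int))) : List (List Int) :=
  match tuple_cons with
  | [] => []
  | c0 :: _ =>
      -- con[n_flags:] cast to Int entries, as for port A: exact when it holds no None (Pre_)
      tuple_cons.foldl (fun res con =>
        res ++ (pvB_row (con.take c0.length)).map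
          (fun d => d ++ (con.drop c0.length).map (fun x => x.getD 0))) []

-- ===== PRECONDITION & SPEC =====
-- Pre_ excludes a row shorter than the first row (A raises IndexError) and a row carrying a
-- None at a position ≥ the first row's length (A returns it un-expanded, still containing
-- None — not a value of List Int).
def Pre_expand_constraints_py (tuple_cons : List (List (Option Int))) : Prop :=
  ∀ con ∈ tuple_cons, (tuple_cons.headD []).length ≤ con.length ∧
    (con.drop (tuple_cons.headD []).length).all (fun x => x.isSome)
instance (tuple_cons : List (List (Option Int))) : Decidable (Pre_expand_constraints_py tuple_cons) := by unfold Pre_expand_constraints_py; infer_instance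
def pvWitness_expand_constraints_py : List (List (Option Int)) := [[some 0, none], [none, some 3]]

def Spec_expand_constraints_py (tuple_cons : List (List (Option Int))) (out : List (List Int)) : Prop := out = expand_constraints_py_alt tuple_cons
instance (tuple_cons : List (List (Option Int))) (out : List (List Int)) : Decidable (Spec_expand_constraints_py tuple_cons out) := by unfold Spec_expand_constraints_py; infer_instance

-- ===== CLAIM (what is proved, stated in full; the proofs are below) =====
def Claim_equal_expand_constraints_py : Prop := ∀ (tuple_cons : List (List (Option Int))), Dom_expand_constraints_py tuple_cons → Pre_expand_constraints_py tuple_cons → Spec_expand_constraints_py tuple_cons (expand_constraints_py tuple_cons)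


-- ===== LEMMAS AND PROOFS =====

theorem pv_flatMap_congr' {α β : Type} (l : List α) (f g : α → List β)
    (h : ∀ a ∈ l, f a = g a) : l.flatMap f = l.flatMap g := by
  induction l with
  | nil => rfl
  | cons a t ih =>
    simp only [List.flatMap_cons]
    rw [h a (by simp), ih (fun a ha => h a (by simp [ha]))]

-- the completions of one row, cons-recursively (proof-side characterisation of pvB_row)
def pvComps : List (Option Int) → List (List Int)
  | [] => [[]]
  | none :: rest => (pvComps rest).map (fun c => 0 :: c) ++ (pvComps rest).map (fun c => 1 :: c)
  | some v :: rest => (pvComps rest).map (fun c => v :: c)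

theorem pvB_row_foldl (con : List (Option Int)) (done : List (List Int)) :
    con.foldl (fun done x =>
      match x with
      | none => done.flatMap (fun d => [d ++ [0], d ++ [1]])
      | some v => done.map (fun d => d ++ [v])) done
      = done.flatMap (fun d => (pvComps con).map (fun c => d ++ c)) := by
  induction con generalizing done with
  | nil => simp [pvComps]
  | cons x rest ih =>
    cases x with
    | none =>
      simp only [List.foldl_cons, ih, pvComps, List.flatMap_assoc]
      apply pv_flatMap_congr'
      intro d _
      simp [Function.comp_def, List.map_append, List.append_assoc]
    | some v =>
      simp only [List.foldl_cons, ih, pvComps]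
      rw [List.flatMap_map]
      apply pv_flatMap_congr'
      intro d _
      simp [Function.comp_def]

theorem pvB_row_eq (con : List (Option Int)) : pvB_row con = pvComps con := by
  unfold pvB_row
  rw [pvB_row_foldl]
  simp

theorem pvA_step_flatMap (i : Nat) (tc : List (List (Option Int))) :
    pvA_step i tc = tc.flatMap (fun con =>
      match PySem.List.pyGet? con (Int.ofNat i) with
      | some none =>
          [con.take i ++ [some (0:Int)] ++ con.drop (i + 1),
           con.take i ++ [some (1:Int)] ++ con.drop (i + 1)]
      | _ => [con]) := by
  unfold pvA_step
  rw [PySem.List.foldl_append_eq_flatMap]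
  rw [List.nil_append]
  rfl

theorem pvA_loop_flatMap (is_ : List Nat) (tc : List (List (Option Int))) :
    pvA_loop is_ tc = tc.flatMap (fun con => pvA_loop is_ [con]) := by
  induction is_ generalizing tc with
  | nil => simp [pvA_loop]
  | cons i rest ih =>
    show pvA_loop rest (pvA_step i tc) = _
    rw [pvA_step_flatMap, ih, List.flatMap_assoc]
    apply pv_flatMap_congr'
    intro con _
    show _ = pvA_loop rest (pvA_step i [con])
    rw [pvA_step_flatMap, ih]
    simp

-- one row processed over the remaining indices, with the already-decided prefix concrete:
-- the loop touches only the first suf.length undecided slots; a trailing all-some tail rides along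
theorem pvA_row (suf : List (Option Int)) (pre tail : List Int) :
    pvA_loop (List.range' pre.length suf.length) [pre.map some ++ (suf ++ tail.map some)]
      = (pvComps suf).map (fun c => (pre ++ c ++ tail).map some) := by
  induction suf generalizing pre with
  | nil => simp [pvA_loop, pvComps]
  | cons x rest ih =>
    have hlen : (pre.map some : List (Option Int)).length = pre.length := by simp
    have hget : PySem.List.pyGet? (pre.map some ++ x :: (rest ++ tail.map some)) (Int.ofNat pre.length)
        = some x := by
      rw [← hlen]
      exact PySem.List.pyGet?_append_length _ _ _
    cases x with
    | none =>
      simp only [List.length_cons, List.range'_succ, pvA_loop, pvA_step_flatMap, List.cons_append,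
                 List.flatMap_cons, List.flatMap_nil, List.append_nil, hget]
      have htake : (pre.map some ++ (none : Option Int) :: (rest ++ tail.map some)).take pre.length
          = pre.map some := by
        rw [← hlen]; simp
      have hdrop : (pre.map some ++ (none : Option Int) :: (rest ++ tail.map some)).drop (pre.length + 1)
          = rest ++ tail.map some := by
        rw [show pre.length + 1 = (pre.map some : List (Option Int)).length + 1 from by rw [hlen]]
        simp [List.drop_append]
      rw [htake, hdrop]
      rw [pvA_loop_flatMap]
      have h0 : pre.map some ++ [some 0] ++ (rest ++ tail.map some)
          = (pre ++ [0]).map some ++ (rest ++ tail.map some) := by simp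
      have h1 : pre.map some ++ [some 1] ++ (rest ++ tail.map some)
          = (pre ++ [1]).map some ++ (rest ++ tail.map some) := by simp
      have e0 := ih (pre ++ [(0 : Int)])
      have e1 := ih (pre ++ [(1 : Int)])
      simp only [List.length_append, List.length_cons, List.length_nil] at e0 e1
      simp only [List.flatMap_cons, List.flatMap_nil, List.append_nil, h0, h1]
      rw [show pre.length + 1 = pre.length + (0+1) from rfl] at e0 e1
      rw [e0, e1]
      simp [pvComps, Function.comp_def, List.append_assoc]
    | some v =>
      simp only [List.length_cons, List.range'_succ, pvA_loop, pvA_step_flatMap, List.cons_append,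
                 List.flatMap_cons, List.flatMap_nil, List.append_nil, hget]
      rw [pvA_loop_flatMap]
      have h0 : pre.map some ++ (some v) :: (rest ++ tail.map some)
          = (pre ++ [v]).map some ++ (rest ++ tail.map some) := by simp
      have e0 := ih (pre ++ [v])
      simp only [List.length_append, List.length_cons, List.length_nil] at e0
      simp only [List.flatMap_cons, List.flatMap_nil, List.append_nil, h0]
      rw [show pre.length + 1 = pre.length + (0+1) from rfl] at e0
      rw [e0]
      simp [pvComps, Function.comp_def, List.append_assoc]

-- an all-some list is the some-image of its values
theorem pv_all_isSome_eq (l : List (Option Int)) (h : l.all (fun x => x.isSome) = true) :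
    l = (l.map (fun x => x.getD 0)).map some := by
  induction l with
  | nil => rfl
  | cons x t ih =>
    simp only [List.all_cons, Bool.and_eq_true] at h
    cases x with
    | none => simp at h
    | some v =>
      simp only [List.map_cons, Option.getD_some]
      rw [← ih h.2]

-- one whole row: A's L passes over it, cast to Int rows, give exactly B's completions of the
-- row's flag part, each followed by the cast tail
theorem pvA_row_full (con : List (Option Int)) (L : Nat) (hL : L ≤ con.length)
    (hs : (con.drop L).all (fun x => x.isSome) = true) :
    (pvA_loop (List.range L) [con]).map (fun r => r.map (fun x => x.getD 0))
      = (pvB_row (con.take L)).map (fun d => d ++ (con.drop L).map (fun x => x.getD 0)) := by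
  have hsplit : con = con.take L ++ ((con.drop L).map (fun x => x.getD 0)).map some := by
    conv_lhs => rw [← List.take_append_drop L con]
    rw [← pv_all_isSome_eq _ hs]
  have hlen : (con.take L).length = L := by simp [hL]
  rw [pvB_row_eq]
  conv_lhs => rw [hsplit]
  have h := pvA_row (con.take L) [] ((con.drop L).map (fun x => x.getD 0))
  simp only [List.length_nil, List.map_nil, List.nil_append] at h
  rw [show List.range L = List.range' 0 (con.take L).length from by rw [hlen, List.range_eq_range']]
  rw [h]
  simp [Function.comp_def]

-- ===== VERDICT (by name: the statement is the Claim_ definition above) =====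
theorem expand_constraints_py_spec : Claim_equal_expand_constraints_py := by
  intro tc _hdom hpre
  unfold Spec_expand_constraints_py
  cases tc with
  | nil => rfl
  | cons c0 rest =>
    show (pvA_loop (List.range c0.length) (c0 :: rest)).map (fun con => con.map (fun x => x.getD 0))
        = expand_constraints_py_alt (c0 :: rest)
    show _ = (c0 :: rest).foldl (fun res con =>
        res ++ (pvB_row (con.take c0.length)).map
          (fun d => d ++ (con.drop c0.length).map (fun x => x.getD 0))) []
    rw [PySem.List.foldl_append_eq_flatMap, List.nil_append]
    rw [pvA_loop_flatMap, List.map_flatMap]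
    apply pv_flatMap_congr'
    intro con hcon
    obtain ⟨hL, hs⟩ := hpre con hcon
    simp only [List.headD_cons] at hL hs
    exact pvA_row_full con c0.length hL hs
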